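-- pv_equiv track=rewrite | github.com/basebase-ai/revtops | backend/connectors/slack_tables.py | _format_as_codeblock
-- ===== SOURCE A (Python) =====
-- from typing import Any, TypedDict
--
-- _CODE_CELL_MAX_LEN: int = 20
--
-- def _cell_str(value: Any) -> str:
--     """Convert a cell value to a safe string for display or CSV."""
--     if value is None:
--         return ""
--     s: str = str(value).strip()
--     return s if s else ""
--
-- def _format_as_codeblock(columns: list[str], rows: list[dict[str, Any]]) -> str:
--     """Format medium table as a single monospace code block with truncated cells."""
--     def truncate(s: str, max_len: int = _CODE_CELL_MAX_LEN) -> str: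
--         s = s.replace("\n", " ").strip()
--         return (s[: max_len - 1] + "…") if len(s) > max_len else s
--
--     cells: list[list[str]] = [[truncate(str(col)) for col in columns]]
--     for row in rows:
--         cells.append([truncate(_cell_str(row.get(col))) for col in columns])
--
--     col_widths: list[int] = [max(len(cells[r][c]) for r in range(len(cells))) for c in range(len(columns))]
--     lines: list[str] = []
--     for i, row_cells in enumerate(cells):
--         line: str = " | ".join(c.ljust(col_widths[j]) for j, c in enumerate(row_cells))
--         lines.append(line)
--     return "```\n" + "\n".join(lines) + "\n```"
-- ===== SOURCE B (Python) =====
-- from typing import Any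
--
-- _CODE_CELL_MAX_LEN: int = 20
--
-- def _cell_str(value: Any) -> str:
--     if value is None:
--         return ""
--     s: str = str(value).strip()
--     return s if s else ""
--
-- def _format_as_codeblock(columns: list[str], rows: list[dict[str, Any]]) -> str:
--     """Column-major: build each column fully (header cell + its data cells), pad the
--     whole column to its own width immediately, then transpose the padded columns
--     into lines; no row-major cell matrix and no separate width table."""
--     def truncate(s: str, max_len: int = _CODE_CELL_MAX_LEN) -> str:
--         s = s.replace("\n", " ").strip()
--         return (s[: max_len - 1] + "…") if len(s) > max_len else s
--
--     cols: list[list[str]] = []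
--     for col in columns:
--         cells = [truncate(str(col))] + [truncate(_cell_str(row.get(col))) for row in rows]
--         w = max(len(c) for c in cells)
--         cols.append([c.ljust(w) for c in cells])
--     lines = [" | ".join(col[i] for col in cols) for i in range(len(rows) + 1)]
--     return "```\n" + "\n".join(lines) + "\n```"
-- ===== Notes on version B (the rewrite author's own statement) =====
-- stated objective: alternative
-- what changed: B is column-major: it builds each column (header cell plus its data cells) as a unit, pads that whole column to its own width immediately, and then transposes the padded columns into lines, instead of A's row-major cell matrix with a separate column-width table and per-row ljust during rendering.
import Mathlib
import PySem

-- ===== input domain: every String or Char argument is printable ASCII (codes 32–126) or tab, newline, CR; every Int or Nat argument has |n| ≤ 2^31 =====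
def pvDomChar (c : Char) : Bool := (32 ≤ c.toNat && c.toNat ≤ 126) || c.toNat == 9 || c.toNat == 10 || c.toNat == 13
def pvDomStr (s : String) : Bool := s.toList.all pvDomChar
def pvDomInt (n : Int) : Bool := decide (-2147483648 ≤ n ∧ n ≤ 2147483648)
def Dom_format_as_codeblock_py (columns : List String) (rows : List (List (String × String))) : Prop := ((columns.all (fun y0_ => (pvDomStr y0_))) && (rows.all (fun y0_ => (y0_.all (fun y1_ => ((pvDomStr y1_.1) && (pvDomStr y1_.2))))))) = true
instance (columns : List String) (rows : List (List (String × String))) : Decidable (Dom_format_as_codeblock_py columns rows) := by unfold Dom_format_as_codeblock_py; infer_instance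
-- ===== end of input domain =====

-- B builds the table column-major (each column padded to its own width as a unit) and transposes into
-- lines, replacing A's row-major cell matrix + separate width table; alternative decomposition, same cost.

-- ===== PORT A =====
-- shared cell helpers (identical in both Python versions)
-- truncate(s): replace '\n' by ' ', strip, cut to 19 chars + '…' if longer than 20 (exact: slice [:19] on nonneg bound)
def pvTruncate (s : String) : String :=
  let t := PySem.Str.strip (PySem.Str.replace s "\n" " ")
  if 20 < t.toList.length then String.ofList (PySem.List.slice t.toList none (some 19)) ++ "…" else t

-- _cell_str(row.get(col)): None ↦ "", a string s ↦ s.strip() ('s if s else ""' is the identity)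
def pvCellStr (v : Option String) : String :=
  match v with
  | none => ""
  | some s => PySem.Str.strip s

-- c.ljust(w): pad with spaces on the right to width w (exact on chars)
def pvLjust (s : String) (w : Nat) : String :=
  String.ofList (s.toList ++ List.replicate (w - s.toList.length) ' ')

-- [truncate(_cell_str(row.get(col))) for col in columns]  (dict lookup = first match)
def pvRowCells (columns : List String) (row : List (String × String)) : List String :=
  columns.map (fun col => pvTruncate (pvCellStr (List.lookup col row)))

def format_as_codeblock_py (columns : List String) (rows : List (List (String × String))) : String :=
  let cells : List (List String) :=
    rows.foldl (fun acc row => acc ++ [pvRowCells columns row]) [columns.map pvTruncate]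
  -- col_widths[c] = max(len(cells[r][c]) for r in range(len(cells))): Python max of a nonempty
  -- int list is the running max of its tail from its head; the [] branch is unreachable (header row).
  let colWidths : List Nat :=
    (List.range columns.length).map (fun c =>
      match (List.range cells.length).map (fun r => ((cells.getD r []).getD c "").toList.length) with
      | [] => 0
      | x :: t => t.foldl max x)
  let lines : List String :=
    cells.map (fun rowCells =>
      PySem.Str.join " | "
        ((PySem.List.enumerate rowCells).map (fun jc => pvLjust jc.2 (colWidths.getD jc.1.toNat 0))))
  "```\n" ++ PySem.Str.join "\n" lines ++ "\n```"

-- ===== PORT B =====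
-- max(len(c) for c in cells) on the (always nonempty) cons-shaped column
def pvMaxLen : List String → Nat
  | [] => 0
  | c :: t => t.foldl (fun m s => max m s.toList.length) c.toList.length

def format_as_codeblock_py_alt (columns : List String) (rows : List (List (String × String))) : String :=
  let cols : List (List String) :=
    columns.map (fun col =>
      let cells := pvTruncate col :: rows.map (fun row => pvTruncate (pvCellStr (List.lookup col row)))
      let w := pvMaxLen cells
      cells.map (fun c => pvLjust c w))
  let lines : List String :=
    (List.range (rows.length + 1)).map (fun i =>
      PySem.Str.join " | " (cols.map (fun col => col.getD i "")))
  "```\n" ++ PySem.Str.join "\n" lines ++ "\n```"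

-- ===== PRECONDITION & SPEC =====
def Spec_format_as_codeblock_py (columns : List String) (rows : List (List (String × String))) (out : String) : Prop := out = format_as_codeblock_py_alt columns rows
instance (columns : List String) (rows : List (List (String × String))) (out : String) : Decidable (Spec_format_as_codeblock_py columns rows out) := by unfold Spec_format_as_codeblock_py; infer_instance

-- ===== CLAIM (what is proved, stated in full; the proofs are below) =====
def Claim_equal_format_as_codeblock_py : Prop := ∀ (columns : List String) (rows : List (List (String × String))), Dom_format_as_codeblock_py columns rows → Spec_format_as_codeblock_py columns rows (format_as_codeblock_py columns rows)

-- ===== LEMMAS AND PROOFS =====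

-- (range L.length).map (fun r => g (L.getD r d)) is just L.map g
theorem pv_map_range_getD {A B : Type} (L : List A) (d : A) (g : A -> B) :
    (List.range L.length).map (fun r => g (L.getD r d)) = L.map g := by
  apply List.ext_getElem
  · simp
  · intro k h1 h2
    simp [List.getD_eq_getElem?_getD, List.getElem?_eq_getElem (by simpa using h2)]

-- enumerate-and-index rendering equals mapping over column indices
theorem pv_enum_render (rc : List String) (W : List Nat) (h : rc.length = W.length) :
    (PySem.List.enumerate rc 0).map (fun jc => pvLjust jc.2 (W.getD jc.1.toNat 0))
      = (List.range W.length).map (fun c => pvLjust (rc.getD c "") (W.getD c 0)) := by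
  apply List.ext_getElem
  · simp [PySem.List.length_enumerate, h]
  · intro k h1 h2
    have hk : k < rc.length := by simpa [PySem.List.length_enumerate] using h1
    rw [List.getElem_map, List.getElem_map, PySem.List.getElem_enumerate]
    simp [List.getD_eq_getElem?_getD, List.getElem?_eq_getElem hk]

-- A's cell matrix: fold-append equals header :: mapped rows
theorem pv_cells_eq (columns : List String) (rows : List (List (String × String))) :
    rows.foldl (fun acc row => acc ++ [pvRowCells columns row]) [columns.map pvTruncate]
      = (columns.map pvTruncate) :: rows.map (pvRowCells columns) := by
  rw [PySem.List.foldl_append_singleton_eq_map]; rfl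

-- getD of a map over range
theorem pv_getD_map_range {B : Type} [Inhabited B] (n : Nat) (f : Nat → B) (c : Nat) (h : c < n) (d : B) :
    ((List.range n).map f).getD c d = f c := by
  rw [List.getD_eq_getElem _ _ (by simpa using h), List.getElem_map, List.getElem_range]

-- ===== VERDICT (by name: the statement is the Claim_ definition above) =====
set_option maxHeartbeats 2000000 in
theorem format_as_codeblock_py_spec : Claim_equal_format_as_codeblock_py := by
  intro columns rows _
  unfold Spec_format_as_codeblock_py format_as_codeblock_py format_as_codeblock_py_alt
  simp only []
  rw [pv_cells_eq]
  set R : List (List String) := (columns.map pvTruncate) :: rows.map (pvRowCells columns) with hR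
  -- the common per-column width
  set Wfn : Nat → Nat := fun c =>
    rows.foldl (fun m row => max m (((pvRowCells columns row).getD c "").toList.length))
      (((columns.map pvTruncate).getD c "").toList.length) with hWfn
  -- A's column-major max scan computes Wfn columnwise
  have hA : (List.range columns.length).map (fun c =>
        match (List.range R.length).map (fun r => ((R.getD r []).getD c "").toList.length) with
        | [] => 0
        | x :: t => t.foldl max x)
      = (List.range columns.length).map Wfn := by
    apply List.map_congr_left
    intro c _
    have h1 : (List.range R.length).map (fun r => ((R.getD r []).getD c "").toList.length)
        = R.map (fun rc => (rc.getD c "").toList.length) :=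
      pv_map_range_getD R [] (fun rc => (rc.getD c "").toList.length)
    rw [h1, hR]
    show List.foldl max (((columns.map pvTruncate).getD c "").toList.length)
        ((rows.map (pvRowCells columns)).map (fun rc => (rc.getD c "").toList.length)) = _
    simp only [List.map_map, List.foldl_map, hWfn]
    rfl
  rw [hA]
  -- every row of R has columns.length cells
  have hlenR : ∀ rc ∈ R, rc.length = columns.length := by
    intro rc hm
    rcases List.mem_cons.mp hm with h | h
    · simp [h]
    · obtain ⟨r, _, rfl⟩ := List.mem_map.mp h; simp [pvRowCells]
  -- A's rendering: enumerate+index → index map over range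
  have hrender : R.map (fun rowCells =>
        PySem.Str.join " | "
          ((PySem.List.enumerate rowCells).map (fun jc =>
            pvLjust jc.2 (((List.range columns.length).map Wfn).getD jc.1.toNat 0))))
      = R.map (fun rc =>
          PySem.Str.join " | "
            ((List.range columns.length).map (fun c =>
              pvLjust (rc.getD c "") (((List.range columns.length).map Wfn).getD c 0)))) := by
    apply List.map_congr_left
    intro rc hm
    refine congrArg (PySem.Str.join " | ") ?_
    have := pv_enum_render rc ((List.range columns.length).map Wfn)
      (by simp [hlenR rc hm])
    simpa using this
  rw [hrender]
  refine congrArg (fun z => ("```\n" ++ z) ++ "\n```") ?_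
  refine congrArg (PySem.Str.join "\n") ?_
  -- B's lines: pointwise over row indices i, line i is A's canonical line of row R[i]
  have hRlen : R.length = rows.length + 1 := by rw [hR]; simp
  rw [← pv_map_range_getD R []
        (fun rc => PySem.Str.join " | "
          ((List.range columns.length).map (fun c =>
            pvLjust (rc.getD c "") (((List.range columns.length).map Wfn).getD c 0)))),
      hRlen]
  apply List.map_congr_left
  intro i hi
  have hi' : i < R.length := by rw [hRlen]; exact List.mem_range.mp hi
  refine congrArg (PySem.Str.join " | ") ?_
  apply List.ext_getElem
  · simp
  · intro c hc1 hc2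
    have hcc : c < columns.length := by simpa using hc1
    rw [List.getElem_map, List.getElem_range, List.getElem_map, List.getElem_map]
    -- the c-th column's raw cells are R's column c
    have hcol : (pvTruncate columns[c] ::
          rows.map (fun row => pvTruncate (pvCellStr (List.lookup columns[c] row))))
        = R.map (fun rc => rc.getD c "") := by
      rw [hR, List.map_cons, List.map_map]
      refine congrArg₂ List.cons ?_ ?_
      · rw [List.getD_eq_getElem _ _ (by simpa using hcc), List.getElem_map]
      · apply List.map_congr_left
        intro row _
        show pvTruncate (pvCellStr (List.lookup columns[c] row))
            = (pvRowCells columns row).getD c ""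
        rw [pvRowCells, List.getD_eq_getElem _ _ (by simpa using hcc), List.getElem_map]
    rw [hcol]
    -- index into the padded column
    have hlen : ((R.map (fun rc => rc.getD c "")).map
        (fun s => pvLjust s (pvMaxLen (R.map (fun rc => rc.getD c ""))))).length = R.length := by
      simp
    rw [List.getD_eq_getElem
          ((R.map (fun rc => rc.getD c "")).map
            (fun s => pvLjust s (pvMaxLen (R.map (fun rc => rc.getD c "")))))
          "" (by rw [hlen]; exact hi'), List.getElem_map, List.getElem_map]
    -- the column's max length is Wfn c
    have hmax : pvMaxLen (R.map (fun rc => rc.getD c "")) = Wfn c := by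
      rw [hR, List.map_cons, List.map_map, pvMaxLen]
      simp only [List.foldl_map, hWfn]
      rfl
    rw [pv_getD_map_range _ _ _ hcc]
    exact congrArg₂ pvLjust
      (congrArg (fun rc => rc.getD c "") (List.getD_eq_getElem _ _ hi')) hmax.symm
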